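-- pv_equiv track=rewrite | github.com/Ayushk4/AllenNLP_Hacks | app/add_links.py | format_string_with_links
-- ===== SOURCE A (Python) =====
-- def format_string_with_links(orig_text, links):
--     if len(links) == 0:
--         return orig_text
--     txt = orig_text[:links[0][1]]
--     for i,link in enumerate(links):
--         txt += '<a href="' + link[0] + '">' + orig_text[link[1]:link[2]] + "</a>"
--         if i != len(links) - 1:
--             txt += orig_text[link[2]:links[i+1][1]]
--     txt += orig_text[links[-1][2]:]
--
--     return txt
-- ===== SOURCE B (Python) =====
-- def format_string_with_links(orig_text, links):
--     bounds = [0] + [b for link in links for b in (link[1], link[2])] + [len(orig_text)]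
--     segs = [orig_text[a:b] for a, b in zip(bounds, bounds[1:])]
--     for i, link in enumerate(links):
--         segs[2*i + 1] = '<a href="' + link[0] + '">' + segs[2*i + 1] + '</a>'
--     return ''.join(segs)
-- ===== Notes on version B (the rewrite author's own statement) =====
-- stated objective: alternative
-- what changed: Instead of A's single accumulating pass with prefix slice, enumerate-lookahead to links[i+1] and last-element suffix, B works in stages over a materialised segment list: it builds the flat boundary list [0, s0, e0, s1, e1, ..., len], slices the text into the 2k+1 consecutive segments by zipping adjacent boundaries, overwrites each odd-position segment with its anchor-wrapped form by index assignment, and joins the list once.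
import Mathlib
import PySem

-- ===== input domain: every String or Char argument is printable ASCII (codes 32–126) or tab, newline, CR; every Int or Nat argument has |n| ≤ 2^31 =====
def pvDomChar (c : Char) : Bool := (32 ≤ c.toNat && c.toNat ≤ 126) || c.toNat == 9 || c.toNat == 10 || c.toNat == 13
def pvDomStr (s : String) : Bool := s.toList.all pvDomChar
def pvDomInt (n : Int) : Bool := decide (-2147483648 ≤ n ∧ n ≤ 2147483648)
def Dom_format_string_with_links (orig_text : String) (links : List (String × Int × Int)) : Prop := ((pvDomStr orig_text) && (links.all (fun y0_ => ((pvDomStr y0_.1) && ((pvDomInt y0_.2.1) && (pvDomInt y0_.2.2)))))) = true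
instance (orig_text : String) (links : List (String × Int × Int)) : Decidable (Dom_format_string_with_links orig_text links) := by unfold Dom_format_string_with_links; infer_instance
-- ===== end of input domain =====

-- B replaces A's accumulating pass (prefix slice, enumerate with lookahead, suffix) by staged passes
-- over a materialised segment list: boundary list, slice into 2k+1 segments, wrap odd segments in
-- place, join once; same output (alternative decomposition, not claimed faster).

-- ===== PORT A =====
-- literal port of A: early return on empty links, prefix orig[:links[0][1]],
-- loop over enumerate(links) with lookahead links[i+1] (in range whenever read, so getD is exact), suffix orig[links[-1][2]:]
def format_string_with_links (orig_text : String) (links : List (String × Int × Int)) : String :=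
  let o := orig_text.toList
  if links.length = 0 then orig_text
  else
    let txt := PySem.Chars.slice o none (some (PySem.List.pyGetD links 0 ("", 0, 0)).2.1)
    let txt := (PySem.List.enumerate links).foldl (fun txt p =>
      let i := p.1
      let link := p.2
      let txt := txt ++ "<a href=\"".toList ++ link.1.toList ++ "\">".toList
        ++ PySem.Chars.slice o (some link.2.1) (some link.2.2) ++ "</a>".toList
      if i ≠ (links.length : Int) - 1 then
        txt ++ PySem.Chars.slice o (some link.2.2) (some (PySem.List.pyGetD links (i + 1) ("", 0, 0)).2.1)
      else txt) txt
    String.ofList (txt ++ PySem.Chars.slice o (some (PySem.List.pyGetD links (-1) ("", 0, 0)).2.2) none)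

-- ===== PORT B =====
-- literal port of B (Source B): boundary list [0, s0, e0, …, len], segments by zipping adjacent
-- boundaries (bounds[1:] is the tail), in-place wrap of each odd-position segment (the index
-- 2*i+1 is nonnegative and in range, so set/getD are exact for Python's segs[2*i+1]), then join
def format_string_with_links_alt (orig_text : String) (links : List (String × Int × Int)) : String :=
  let o := orig_text.toList
  let bounds : List Int := [0] ++ (links.flatMap fun link => [link.2.1, link.2.2]) ++ [(o.length : Int)]
  let segs : List (List Char) :=
    (bounds.zip (PySem.List.slice bounds (some 1) none)).map
      (fun p => PySem.Chars.slice o (some p.1) (some p.2))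
  let segs := (PySem.List.enumerate links).foldl (fun segs p =>
    segs.set (2 * p.1 + 1).toNat
      ("<a href=\"".toList ++ p.2.1.toList ++ "\">".toList
        ++ segs.getD (2 * p.1 + 1).toNat [] ++ "</a>".toList)) segs
  String.ofList segs.flatten

-- ===== PRECONDITION & SPEC =====
def Spec_format_string_with_links (orig_text : String) (links : List (String × Int × Int)) (out : String) : Prop := out = format_string_with_links_alt orig_text links
instance (orig_text : String) (links : List (String × Int × Int)) (out : String) : Decidable (Spec_format_string_with_links orig_text links out) := by unfold Spec_format_string_with_links; infer_instance

-- ===== CLAIM (what is proved, stated in full; the proofs are below) =====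
def Claim_equal_format_string_with_links : Prop := ∀ (orig_text : String) (links : List (String × Int × Int)), Dom_format_string_with_links orig_text links → Spec_format_string_with_links orig_text links (format_string_with_links orig_text links)

-- ===== LEMMAS AND PROOFS =====

-- the anchor text '<a href="url">seg</a>'
def pvWrapStr (url : String) (seg : List Char) : List Char :=
  "<a href=\"".toList ++ url.toList ++ "\">".toList ++ seg ++ "</a>".toList

-- a slice stopping at len(o) is the open-ended slice
theorem pvSlice_len (o : List Char) (a : Int) :
    PySem.List.slice o (some a) (some (o.length : Int)) = PySem.List.slice o (some a) none := by
  simp [PySem.List.slice, PySem.List.clampIdx]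
  split_ifs <;> omega

-- normal form of the output from link l onward
def pvTail (o : List Char) : (String × Int × Int) → List (String × Int × Int) → List Char
  | l, [] => pvWrapStr l.1 (PySem.Chars.slice o (some l.2.1) (some l.2.2))
      ++ PySem.Chars.slice o (some l.2.2) none
  | l, l' :: ls => pvWrapStr l.1 (PySem.Chars.slice o (some l.2.1) (some l.2.2))
      ++ PySem.Chars.slice o (some l.2.2) (some l'.2.1) ++ pvTail o l' ls

-- the raw (unwrapped) segment list from link l onward: mid, gap, mid, gap, …, final
def pvRawTail (o : List Char) : (String × Int × Int) → List (String × Int × Int) → List (List Char)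
  | l, [] => [PySem.Chars.slice o (some l.2.1) (some l.2.2),
      PySem.Chars.slice o (some l.2.2) (some (o.length : Int))]
  | l, l' :: ls => PySem.Chars.slice o (some l.2.1) (some l.2.2)
      :: PySem.Chars.slice o (some l.2.2) (some l'.2.1) :: pvRawTail o l' ls

-- what B's wrapping loop does to the segment list after the first gap
def pvWrapSegs : List (String × Int × Int) → List (List Char) → List (List Char)
  | [], segs => segs
  | _ :: _, [] => []
  | l :: _, [m] => [pvWrapStr l.1 m]
  | l :: ls, m :: g :: rest => pvWrapStr l.1 m :: g :: pvWrapSegs ls rest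

theorem pvA_loop (o : List Char) (ls : List (String × Int × Int)) :
    ∀ (pre : List (String × Int × Int)) (l : String × Int × Int) (txt : List Char),
    (((PySem.List.enumerate (l :: ls) (pre.length : Int)).foldl (fun txt p =>
      let i := p.1
      let link := p.2
      let txt := txt ++ "<a href=\"".toList ++ link.1.toList ++ "\">".toList
        ++ PySem.Chars.slice o (some link.2.1) (some link.2.2) ++ "</a>".toList
      if i ≠ (((pre ++ l :: ls).length : Nat) : Int) - 1 then
        txt ++ PySem.Chars.slice o (some link.2.2)
          (some (PySem.List.pyGetD (pre ++ l :: ls) (i + 1) ("", 0, 0)).2.1)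
      else txt) txt)
      ++ PySem.Chars.slice o (some (PySem.List.pyGetD (pre ++ l :: ls) (-1) ("", 0, 0)).2.2) none)
    = txt ++ pvTail o l ls := by
  induction ls with
  | nil =>
    intro pre l txt
    rw [PySem.List.enumerate_cons, PySem.List.enumerate_nil]
    have hlast : PySem.List.pyGetD (pre ++ [l]) (-1) ("", 0, 0) = l :=
      PySem.List.pyGetD_neg_one_append_singleton pre l ("", 0, 0)
    have hcond : ¬ ((pre.length : Int) ≠ (((pre ++ [l]).length : Nat) : Int) - 1) := by
      simp
    simp only [List.foldl_cons, List.foldl_nil, if_neg hcond, hlast, pvTail, pvWrapStr,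
      List.append_assoc]
  | cons l' ls ih =>
    intro pre l txt
    rw [PySem.List.enumerate_cons]
    have hcond : (pre.length : Int) ≠ (((pre ++ l :: l' :: ls).length : Nat) : Int) - 1 := by
      simp; omega
    have hget : PySem.List.pyGetD (pre ++ l :: l' :: ls) ((pre.length : Int) + 1) ("", 0, 0) = l' := by
      have : (pre.length : Int) + 1 = (((pre ++ [l]).length : Nat) : Int) := by simp
      rw [this, PySem.List.pyGetD_natCast]
      have : pre ++ l :: l' :: ls = (pre ++ [l]) ++ l' :: ls := by simp
      rw [this]
      simp [List.getD]
    simp only [List.foldl_cons, if_pos hcond, hget]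
    have hre : pre ++ l :: l' :: ls = (pre ++ [l]) ++ l' :: ls := by simp
    have hlen : ((pre.length : Int) + 1) = (((pre ++ [l]).length : Nat) : Int) := by simp
    calc _ = (((PySem.List.enumerate (l' :: ls) (((pre ++ [l]).length : Nat) : Int)).foldl (fun txt p =>
            let i := p.1
            let link := p.2
            let txt := txt ++ "<a href=\"".toList ++ link.1.toList ++ "\">".toList
              ++ PySem.Chars.slice o (some link.2.1) (some link.2.2) ++ "</a>".toList
            if i ≠ ((((pre ++ [l]) ++ l' :: ls).length : Nat) : Int) - 1 then
              txt ++ PySem.Chars.slice o (some link.2.2)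
                (some (PySem.List.pyGetD ((pre ++ [l]) ++ l' :: ls) (i + 1) ("", 0, 0)).2.1)
            else txt)
            (txt ++ "<a href=\"".toList ++ l.1.toList ++ "\">".toList
              ++ PySem.Chars.slice o (some l.2.1) (some l.2.2) ++ "</a>".toList
              ++ PySem.Chars.slice o (some l.2.2) (some l'.2.1)))
          ++ PySem.Chars.slice o (some (PySem.List.pyGetD ((pre ++ [l]) ++ l' :: ls) (-1) ("", 0, 0)).2.2) none) := by
            rw [hlen, ← hre]
      _ = txt ++ pvTail o l (l' :: ls) := by
            rw [ih (pre ++ [l]) l' (txt ++ "<a href=\"".toList ++ l.1.toList ++ "\">".toList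
              ++ PySem.Chars.slice o (some l.2.1) (some l.2.2) ++ "</a>".toList
              ++ PySem.Chars.slice o (some l.2.2) (some l'.2.1))]
            simp [pvTail, pvWrapStr]

-- the zipped boundary slices are exactly the raw segment list
theorem pvB_segs (o : List Char) (ls : List (String × Int × Int)) :
    ∀ (p : Int),
    (((p :: ((ls.flatMap fun link => [link.2.1, link.2.2]) ++ [(o.length : Int)])).zip
        ((ls.flatMap fun link => [link.2.1, link.2.2]) ++ [(o.length : Int)])).map
      (fun q => PySem.Chars.slice o (some q.1) (some q.2)))
    = (match ls with
       | [] => [PySem.Chars.slice o (some p) (some (o.length : Int))]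
       | l :: ls' => PySem.Chars.slice o (some p) (some l.2.1) :: pvRawTail o l ls') := by
  induction ls with
  | nil => intro p; simp
  | cons l ls ih =>
    intro p
    cases ls with
    | nil => simp [pvRawTail]
    | cons l' ls' =>
      have := ih l.2.2
      simp only [List.flatMap_cons, List.nil_append, List.cons_append,
        List.zip_cons_cons, List.map_cons] at this ⊢
      rw [this]
      simp [pvRawTail]

-- B's wrapping loop, generalised: with 2*k+1 segments already before it, the enumerate-from-k
-- fold wraps the odd positions of the remainder
theorem pvB_wrap (ls : List (String × Int × Int)) :
    ∀ (k : Nat) (pre rest : List (List Char)), pre.length = 2 * k + 1 →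
      2 * ls.length ≤ rest.length + 1 →
    ((PySem.List.enumerate ls (k : Int)).foldl (fun segs p =>
      segs.set (2 * p.1 + 1).toNat
        ("<a href=\"".toList ++ p.2.1.toList ++ "\">".toList
          ++ segs.getD (2 * p.1 + 1).toNat [] ++ "</a>".toList)) (pre ++ rest))
    = pre ++ pvWrapSegs ls rest := by
  induction ls with
  | nil => intro k pre rest hpre hrest; rw [PySem.List.enumerate_nil]; rfl
  | cons l ls ih =>
    intro k pre rest hpre hrest
    cases rest with
    | nil => simp at hrest; omega
    | cons m rest2 =>
      rw [PySem.List.enumerate_cons, List.foldl_cons]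
      have hidx : ((2 * (k : Int) + 1)).toNat = pre.length := by omega
      have hget : (pre ++ m :: rest2).getD pre.length [] = m := by
        simp [List.getD]
      have hset : (pre ++ m :: rest2).set pre.length
          ("<a href=\"".toList ++ l.1.toList ++ "\">".toList ++ m ++ "</a>".toList)
          = pre ++ ("<a href=\"".toList ++ l.1.toList ++ "\">".toList ++ m ++ "</a>".toList) :: rest2 := by
        rw [List.set_append_right _ _ (le_refl pre.length)]
        simp
      simp only [hidx, hget, hset]
      cases rest2 with
      | nil =>
        cases ls with
        | nil =>
          rw [PySem.List.enumerate_nil]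
          simp [pvWrapSegs, pvWrapStr]
        | cons a b => simp at hrest
      | cons g rest3 =>
        have hcast : (k : Int) + 1 = ((k + 1 : Nat) : Int) := by push_cast; ring
        have hre : pre ++ ("<a href=\"".toList ++ l.1.toList ++ "\">".toList ++ m ++ "</a>".toList) :: g :: rest3
            = (pre ++ [("<a href=\"".toList ++ l.1.toList ++ "\">".toList ++ m ++ "</a>".toList), g]) ++ rest3 := by
          simp
        rw [hcast, hre, ih (k + 1)
          (pre ++ [("<a href=\"".toList ++ l.1.toList ++ "\">".toList ++ m ++ "</a>".toList), g]) rest3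
          (by simp [hpre]; omega) (by simp at hrest ⊢; omega)]
        simp [pvWrapSegs, pvWrapStr]

theorem pvRawTail_length (o : List Char) (ls : List (String × Int × Int)) :
    ∀ (l : String × Int × Int), (pvRawTail o l ls).length = 2 * ls.length + 2 := by
  induction ls with
  | nil => intro l; simp [pvRawTail]
  | cons l' ls ih => intro l; simp [pvRawTail, ih l']; omega

-- flattening the wrapped raw segments gives the normal form
theorem pvB_flatten (o : List Char) (ls : List (String × Int × Int)) :
    ∀ (l : String × Int × Int), (pvWrapSegs (l :: ls) (pvRawTail o l ls)).flatten = pvTail o l ls := by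
  induction ls with
  | nil =>
    intro l
    simp [pvRawTail, pvWrapSegs, pvTail, pvSlice_len]
  | cons l' ls ih =>
    intro l
    simp [pvRawTail, pvWrapSegs, pvTail, ih l']

-- ===== VERDICT (by name: the statement is the Claim_ definition above) =====
theorem format_string_with_links_spec : Claim_equal_format_string_with_links := by
  intro orig_text links _
  unfold Spec_format_string_with_links format_string_with_links format_string_with_links_alt
  simp only [PySem.List.slice_from_one]
  cases links with
  | nil =>
    rw [PySem.List.enumerate_nil]
    simp
    rw [List.take_of_length_le (by simp)]
    simp
  | cons l ls =>
    simp only [List.length_cons, Nat.succ_ne_zero, reduceIte]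
    have hsegs := pvB_segs orig_text.toList ls l.2.2
    have hsegs0 := pvB_segs orig_text.toList (l :: ls) (0 : Int)
    simp only [List.cons_append, List.nil_append, List.tail_cons] at hsegs0 ⊢
    rw [hsegs0]
    have hwrap := pvB_wrap (l :: ls) 0
      [PySem.Chars.slice orig_text.toList (some 0) (some l.2.1)]
      (pvRawTail orig_text.toList l ls) (by simp) (by simp [pvRawTail_length]; omega)
    simp only [Nat.cast_zero, List.singleton_append] at hwrap
    rw [hwrap]
    simp only [List.flatten_cons, pvB_flatten]
    have h0 : PySem.List.pyGetD (l :: ls) 0 ("", 0, 0) = l := PySem.List.pyGetD_zero_cons l ls _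
    have hA := pvA_loop orig_text.toList ls [] l
      (PySem.Chars.slice orig_text.toList none (some (PySem.List.pyGetD (l :: ls) 0 ("", 0, 0)).2.1))
    simp only [List.nil_append, List.length_cons] at hA
    refine (congrArg String.ofList hA).trans ?_
    rw [h0]
    simp
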